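-- pv_equiv track=rewrite | github.com/GuptaAman08/CompetitiveCoding | Code Chef/November 2019/Long Challenge/weirdo.py | Alorbob
-- ===== SOURCE A (Python) =====
-- vowels = ['a', 'e', 'i', 'o', 'u']
--
-- def Alorbob(l2, temp):
--     for j in range(l2-2):
--         if (temp[j] in vowels) and (temp[j+1] not in vowels) and (temp[j+2] not in vowels):
--             return 1
--         elif (temp[j] not in vowels) and (temp[j+1] in vowels) and (temp[j+2] not in vowels):
--             return 1
--         elif (temp[j] not in vowels) and (temp[j+1] not in vowels) and (temp[j+2] in vowels):
--             return 1
--         elif (temp[j] not in vowels) and (temp[j+1] not in vowels) and (temp[j+2] not in vowels):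
--             return 1
--
--     return 0
-- ===== SOURCE B (Python) =====
-- vowels = ['a', 'e', 'i', 'o', 'u']
--
-- def Alorbob(l2, temp):
--     # A 3-window has at most one vowel iff it contains two consonants at
--     # distance <= 2; so one pass tracking the previous consonant's index suffices.
--     if l2 < 3:
--         return 0
--     last = None
--     for i in range(l2):
--         if temp[i] not in vowels:
--             if last is not None and i - last <= 2:
--                 return 1
--             last = i
--     return 0
-- ===== Notes on version B (the rewrite author's own statement) =====
-- stated objective: alternative
-- what changed: Replaces A's sliding 3-window with four mutually exclusive membership cases by a single pass over the characters that tracks the index of the previous consonant and returns 1 as soon as two consonants occur within distance 2 (a 3-window has at most one vowel iff it contains two consonants at distance <= 2); one membership test per character instead of up to six per window.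
-- outside the precondition, e.g. on Alorbob(3, 'aa'): A returns 0, B raises IndexError; on Alorbob(8, 'obaioau'): A returns 0, B raises IndexError
import Mathlib
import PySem

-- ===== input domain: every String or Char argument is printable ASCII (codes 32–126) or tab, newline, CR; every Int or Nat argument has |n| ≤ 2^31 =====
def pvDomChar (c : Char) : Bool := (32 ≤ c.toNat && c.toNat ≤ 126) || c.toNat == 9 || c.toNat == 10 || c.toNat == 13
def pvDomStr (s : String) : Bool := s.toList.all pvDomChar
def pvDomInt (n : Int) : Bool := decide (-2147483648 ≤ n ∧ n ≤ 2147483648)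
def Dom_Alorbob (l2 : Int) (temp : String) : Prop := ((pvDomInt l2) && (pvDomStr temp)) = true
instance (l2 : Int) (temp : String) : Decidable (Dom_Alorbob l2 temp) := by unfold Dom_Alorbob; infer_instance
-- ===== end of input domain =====

-- B replaces A's four-case 3-window enumeration by a single pass that tracks the index of
-- the previous consonant and returns 1 when two consonants occur within distance 2
-- (equivalent predicate); objective: alternative (same cost, different algorithm).

-- ===== PORT A =====
def pvVowels : List Char := ['a', 'e', 'i', 'o', 'u']

-- 'c in vowels'
def pvInV (c : Char) : Bool := pvVowels.contains c

-- 'for j in range(l2-2)': fuel = remaining iterations, j the current index; an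
-- out-of-range temp[j] (Python IndexError, excluded by Pre_) reads the non-vowel
-- default ' ' — exact on Pre_ inputs
def AlorbobGo (cs : List Char) (j : Int) : Nat → Int
  | 0 => 0
  | n + 1 =>
    let c0 := PySem.List.pyGetD cs j ' '
    let c1 := PySem.List.pyGetD cs (j + 1) ' '
    let c2 := PySem.List.pyGetD cs (j + 2) ' '
    if pvInV c0 && !pvInV c1 && !pvInV c2 then 1
    else if !pvInV c0 && pvInV c1 && !pvInV c2 then 1
    else if !pvInV c0 && !pvInV c1 && pvInV c2 then 1
    else if !pvInV c0 && !pvInV c1 && !pvInV c2 then 1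
    else AlorbobGo cs (j + 1) n

def Alorbob (l2 : Int) (temp : String) : Int :=
  AlorbobGo temp.toList 0 (l2 - 2).toNat

-- ===== PORT B =====
-- 'for i in range(l2)' with state last : Option Int (index of the previous consonant);
-- an out-of-range temp[i] (excluded by Pre_) reads the non-vowel default ' '
def AlorbobAltGo (cs : List Char) (last : Option Int) (i : Int) : Nat → Int
  | 0 => 0
  | n + 1 =>
    if !pvInV (PySem.List.pyGetD cs i ' ') then
      if (match last with | some p => decide (i - p ≤ 2) | none => false) then 1
      else AlorbobAltGo cs (some i) (i + 1) n
    else AlorbobAltGo cs last (i + 1) n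

def Alorbob_alt (l2 : Int) (temp : String) : Int :=
  if l2 < 3 then 0 else AlorbobAltGo temp.toList none 0 l2.toNat

-- ===== PRECONDITION & SPEC =====
-- vowel test for the precondition (kept separate from the ports' helpers)
def pvPreVowel (c : Char) : Bool := c = 'a' || c = 'e' || c = 'i' || c = 'o' || c = 'u'

-- Pre_ excludes exactly the inputs where Python A raises IndexError, plus the corner
-- l2 = len(temp)+1 with the last two characters vowels, where A's returning 0 is an
-- accident of and-short-circuit skipping the out-of-range read and the natural B raises.
def Pre_Alorbob (l2 : Int) (temp : String) : Prop :=
  l2 ≤ 2 ∨ l2 ≤ (temp.toList.length : Int) ∨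
  ∃ j < temp.toList.length, j + 3 ≤ temp.toList.length ∧
    ((temp.toList.drop j).take 3).countP pvPreVowel ≤ 1
instance (l2 : Int) (temp : String) : Decidable (Pre_Alorbob l2 temp) := by
  unfold Pre_Alorbob; infer_instance

def pvWitness_Alorbob : Int × String := (3, "abc")

def Spec_Alorbob (l2 : Int) (temp : String) (out : Int) : Prop := out = Alorbob_alt l2 temp
instance (l2 : Int) (temp : String) (out : Int) : Decidable (Spec_Alorbob l2 temp out) := by
  unfold Spec_Alorbob; infer_instance

-- ===== CLAIM (what is proved, stated in full; the proofs are below) =====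
def Claim_equal_Alorbob : Prop := ∀ (l2 : Int) (temp : String),
  Dom_Alorbob l2 temp → Pre_Alorbob l2 temp → Spec_Alorbob l2 temp (Alorbob l2 temp)

-- ===== LEMMAS AND PROOFS =====
-- 'temp[m] is a consonant' as both ports read it (out-of-range default ' ' is a consonant)
def pvCons (cs : List Char) (m : Int) : Bool := !pvInV (PySem.List.pyGetD cs m ' ')

-- 'the 3-window at j has at most one vowel' = 'it has two consonants'
def pvWin (cs : List Char) (j : Int) : Bool :=
  (pvCons cs j && pvCons cs (j + 1)) || (pvCons cs j && pvCons cs (j + 2)) ||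
    (pvCons cs (j + 1) && pvCons cs (j + 2))

-- A's loop, normalised: search for a qualifying window
def pvAnyWin (cs : List Char) (j : Int) : Nat → Bool
  | 0 => false
  | n + 1 => pvWin cs j || pvAnyWin cs (j + 1) n

lemma pvA_norm (cs : List Char) : ∀ (n : Nat) (j : Int),
    AlorbobGo cs j n = if pvAnyWin cs j n then 1 else 0 := by
  intro n
  induction n with
  | zero => intro j; rfl
  | succ n ih =>
    intro j
    simp only [AlorbobGo, pvAnyWin, ih]
    cases h0 : pvInV (PySem.List.pyGetD cs j ' ') <;>
      cases h1 : pvInV (PySem.List.pyGetD cs (j + 1) ' ') <;>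
        cases h2 : pvInV (PySem.List.pyGetD cs (j + 2) ' ') <;>
          simp [pvWin, pvCons, h0, h1, h2]

lemma pvAnyWin_iff (cs : List Char) : ∀ (n : Nat) (j : Int),
    pvAnyWin cs j n = true ↔ ∃ k : Nat, k < n ∧ pvWin cs (j + k) = true := by
  intro n
  induction n with
  | zero => intro j; simp [pvAnyWin]
  | succ n ih =>
    intro j
    simp only [pvAnyWin, Bool.or_eq_true, ih]
    constructor
    · rintro (h | ⟨k, hk, hw⟩)
      · exact ⟨0, by omega, by simpa using h⟩
      · exact ⟨k + 1, by omega, by convert hw using 2; push_cast; ring⟩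
    · rintro ⟨k, hk, hw⟩
      cases k with
      | zero => left; simpa using hw
      | succ k => right; exact ⟨k, by omega, by convert hw using 2; push_cast; ring⟩

-- B's loop returns 1 iff some scanned consonant lies within 2 of an earlier consonant
-- (earlier in the scan, or the incoming 'last'); needs last < i
lemma pvB_iff (cs : List Char) : ∀ (n : Nat) (i : Int) (last : Option Int),
    (∀ p, last = some p → p < i) →
    (AlorbobAltGo cs last i n = 1 ↔
      ∃ k : Nat, k < n ∧ pvCons cs (i + k) = true ∧
        ((∃ m : Nat, m < k ∧ pvCons cs (i + m) = true ∧ k - m ≤ 2) ∨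
         (∃ p, last = some p ∧ i + k - p ≤ 2))) ∧
    (AlorbobAltGo cs last i n = 0 ∨ AlorbobAltGo cs last i n = 1) := by
  intro n
  induction n with
  | zero =>
    intro i last _
    constructor
    · simp [AlorbobAltGo]
    · left; rfl
  | succ n ih =>
    intro i last hlast
    by_cases hc : pvCons cs i = true
    · -- consonant at i
      by_cases hnear : ∃ p, last = some p ∧ i - p ≤ 2
      · -- returns 1 immediately
        obtain ⟨p, hp, hle⟩ := hnear
        have hone : AlorbobAltGo cs last i (n + 1) = 1 := by
          simp only [AlorbobAltGo, pvCons] at hc ⊢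
          rw [hc]
          simp [hp, hle]
        refine ⟨⟨fun _ => ?_, fun _ => hone⟩, Or.inr hone⟩
        exact ⟨0, by omega, by simpa using hc, Or.inr ⟨p, hp, by simpa using hle⟩⟩
      · -- recurse with last := some i
        have hrec : AlorbobAltGo cs last i (n + 1) = AlorbobAltGo cs (some i) (i + 1) n := by
          simp only [AlorbobAltGo, pvCons] at hc ⊢
          rw [hc]
          cases hl : last with
          | none => simp
          | some p =>
            have : ¬ (i - p ≤ 2) := fun h => hnear ⟨p, hl, h⟩
            simp [this]
        obtain ⟨ihiff, ihv⟩ := ih (i + 1) (some i) (by intro p hp; cases hp; omega)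
        rw [hrec]
        refine ⟨?_, ihv⟩
        rw [ihiff]
        constructor
        · rintro ⟨k, hk, hck, h | h⟩
          · obtain ⟨m, hm, hcm, hmk⟩ := h
            exact ⟨k + 1, by omega, by convert hck using 2 <;> push_cast <;> ring,
              Or.inl ⟨m + 1, by omega, by convert hcm using 2 <;> push_cast <;> ring, by omega⟩⟩
          · obtain ⟨p, hp, hle⟩ := h
            cases hp
            exact ⟨k + 1, by omega, by convert hck using 2 <;> push_cast <;> ring,
              Or.inl ⟨0, by omega, by simpa using hc, by omega⟩⟩
        · rintro ⟨k, hk, hck, h | h⟩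
          · obtain ⟨m, hm, hcm, hmk⟩ := h
            cases k with
            | zero => omega
            | succ k =>
              cases m with
              | zero =>
                exact ⟨k, by omega, by convert hck using 2 <;> push_cast <;> ring,
                  Or.inr ⟨i, rfl, by push_cast; omega⟩⟩
              | succ m =>
                exact ⟨k, by omega, by convert hck using 2 <;> push_cast <;> ring,
                  Or.inl ⟨m, by omega, by convert hcm using 2 <;> push_cast <;> ring, by omega⟩⟩
          · obtain ⟨p, hp, hle⟩ := h
            have hpi : p < i := hlast p hp
            cases k with
            | zero =>
              exfalso; exact hnear ⟨p, hp, by simpa using hle⟩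
            | succ k =>
              exact ⟨k, by omega, by convert hck using 2 <;> push_cast <;> ring,
                Or.inr ⟨i, rfl, by push_cast at hle ⊢; omega⟩⟩
    · -- vowel at i: recurse with unchanged last
      have hrec : AlorbobAltGo cs last i (n + 1) = AlorbobAltGo cs last (i + 1) n := by
        simp only [AlorbobAltGo, pvCons] at hc ⊢
        simp only [Bool.not_eq_true, Bool.not_eq_eq_eq_not, Bool.not_true] at hc
        simp [hc]
      obtain ⟨ihiff, ihv⟩ := ih (i + 1) last (by intro p hp; have := hlast p hp; omega)
      rw [hrec]
      refine ⟨?_, ihv⟩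
      rw [ihiff]
      constructor
      · rintro ⟨k, hk, hck, h | h⟩
        · obtain ⟨m, hm, hcm, hmk⟩ := h
          exact ⟨k + 1, by omega, by convert hck using 2 <;> push_cast <;> ring,
            Or.inl ⟨m + 1, by omega, by convert hcm using 2 <;> push_cast <;> ring, by omega⟩⟩
        · obtain ⟨p, hp, hle⟩ := h
          exact ⟨k + 1, by omega, by convert hck using 2 <;> push_cast <;> ring,
            Or.inr ⟨p, hp, by push_cast at hle ⊢; omega⟩⟩
      · rintro ⟨k, hk, hck, h | h⟩
        · obtain ⟨m, hm, hcm, hmk⟩ := h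
          cases k with
          | zero =>
            exfalso; exact hc (by simpa using hck)
          | succ k =>
            cases m with
            | zero =>
              exfalso; exact hc (by simpa using hcm)
            | succ m =>
              exact ⟨k, by omega, by convert hck using 2 <;> push_cast <;> ring,
                Or.inl ⟨m, by omega, by convert hcm using 2 <;> push_cast <;> ring, by omega⟩⟩
        · obtain ⟨p, hp, hle⟩ := h
          cases k with
          | zero =>
            exfalso; exact hc (by simpa using hck)
          | succ k =>
            exact ⟨k, by omega, by convert hck using 2 <;> push_cast <;> ring,
              Or.inr ⟨p, hp, by push_cast at hle ⊢; omega⟩⟩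

-- the combinatorial core: 'some 3-window in [0, n-3] has two consonants' iff
-- 'two consonants occur at distance ≤ 2 among indices < n' (n ≥ 3)
lemma pvWin_pair (cs : List Char) (n : Nat) (hn : 3 ≤ n) :
    (∃ k : Nat, k < n - 2 ∧ pvWin cs ((0 : Int) + k) = true) ↔
    (∃ k : Nat, k < n ∧ pvCons cs ((0 : Int) + k) = true ∧
      ∃ m : Nat, m < k ∧ pvCons cs ((0 : Int) + m) = true ∧ k - m ≤ 2) := by
  constructor
  · rintro ⟨k, hk, hw⟩
    simp only [pvWin, Bool.or_eq_true, Bool.and_eq_true] at hw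
    rcases hw with (⟨h1, h2⟩ | ⟨h1, h2⟩) | ⟨h1, h2⟩
    · exact ⟨k + 1, by omega, by convert h2 using 2 <;> push_cast <;> ring,
        k, by omega, h1, by omega⟩
    · exact ⟨k + 2, by omega, by convert h2 using 2 <;> push_cast <;> ring,
        k, by omega, h1, by omega⟩
    · exact ⟨k + 2, by omega, by convert h2 using 2 <;> push_cast <;> ring,
        k + 1, by omega, by convert h1 using 2 <;> push_cast <;> ring, by omega⟩
  · rintro ⟨k, hk, hck, m, hm, hcm, hmk⟩
    by_cases h2 : 2 ≤ k
    · refine ⟨k - 2, by omega, ?_⟩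
      simp only [pvWin, Bool.or_eq_true, Bool.and_eq_true]
      -- m ∈ {k-2, k-1}, k = (k-2)+2
      have hk2 : ((0 : Int) + (k - 2 : Nat)) + 2 = (0 : Int) + k := by push_cast; omega
      rcases (by omega : m = k - 2 ∨ m = k - 1) with hme | hme
      · refine Or.inl (Or.inr ⟨?_, ?_⟩)
        · convert hcm using 2; push_cast; omega
        · rw [hk2]; exact hck
      · refine Or.inr ⟨?_, ?_⟩
        · convert hcm using 2 <;> (push_cast; omega)
        · convert hck using 2 <;> (push_cast; omega)
    · -- k ≤ 1, so m = 0, k = 1: window 0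
      have hk1 : k = 1 := by omega
      have hm0 : m = 0 := by omega
      refine ⟨0, by omega, ?_⟩
      simp only [pvWin, Bool.or_eq_true, Bool.and_eq_true]
      exact Or.inl (Or.inl ⟨by simpa [hm0] using hcm, by simpa [hk1] using hck⟩)

-- ===== VERDICT (by name: the statement is the Claim_ definition above) =====
theorem Alorbob_spec : Claim_equal_Alorbob := by
  intro l2 temp _ _
  unfold Spec_Alorbob Alorbob Alorbob_alt
  by_cases h3 : l2 < 3
  · have : (l2 - 2).toNat = 0 := by omega
    simp [this, h3, AlorbobGo]
  · simp only [h3, if_false]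
    set cs := temp.toList
    have hA := pvA_norm cs (l2 - 2).toNat 0
    obtain ⟨hBiff, hBv⟩ := pvB_iff cs l2.toNat 0 none (by intro p hp; cases hp)
    have hn : 3 ≤ l2.toNat := by omega
    have hsub : (l2 - 2).toNat = l2.toNat - 2 := by omega
    have key : pvAnyWin cs 0 (l2 - 2).toNat = true ↔ AlorbobAltGo cs none 0 l2.toNat = 1 := by
      rw [pvAnyWin_iff, hBiff, hsub]
      rw [pvWin_pair cs l2.toNat hn]
      constructor
      · rintro ⟨k, hk, hck, hrest⟩
        exact ⟨k, hk, hck, Or.inl hrest⟩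
      · rintro ⟨k, hk, hck, h | h⟩
        · exact ⟨k, hk, hck, h⟩
        · obtain ⟨p, hp, _⟩ := h; cases hp
    rw [hA]
    cases hw : pvAnyWin cs 0 (l2 - 2).toNat with
    | false =>
      simp only [Bool.false_eq_true, if_false]
      rcases hBv with h0 | h1
      · exact h0.symm
      · exact absurd (key.mpr h1) (by simp [hw])
    | true =>
      simp only [if_true]
      exact (key.mp hw).symm
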